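-- pv_equiv track=rewrite | github.com/queenJiJi/Algorithm_Study | 알고리즘/DFS-BFS/퍼즐조각채우기.py | find_shape
-- ===== SOURCE A (Python) =====
-- from collections import deque
--
-- def find_shape(board,x,y,value):
--     n = len(board)
--     q = deque()
--     q.append((x,y))
--     shape= [(x,y)] # 조각 저장
--     board[x][y] = -1 # 방문 처리
--
--     while q:
--         r,c = q.popleft()
--
--         for dx,dy in [[-1,0],[1,0],[0,-1],[0,1]]:
--             nx,ny = dx+r, dy+c
--
--             if 0<=nx<n and 0<=ny<n and board[nx][ny] == value:
--                 board[nx][ny] = -1 #방문처리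
--                 q.append((nx,ny))
--                 shape.append((nx,ny))
--     # 평등하게 비교해야하니까 정규화과정
--     shape.sort()
--     min_x, min_y = shape[0][0], shape[0][1]
--     normalized_shape = [(x-min_x, y-min_y) for x,y in shape]
--     return normalized_shape
-- ===== SOURCE B (Python) =====
-- # Queue-free fixpoint label propagation: repeatedly rescan the whole board,
-- # marking any value-cell adjacent to an already-marked coordinate, until one
-- # full pass changes nothing; no BFS queue/stack at all.  Mutates `board` the
-- # same way A does (every visited cell set to -1).
-- def find_shape(board, x, y, value):
--     n = len(board)
--     board[x][y] = -1
--     marked = {(x, y)}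
--     changed = True
--     while changed:
--         changed = False
--         for r in range(n):
--             for c in range(n):
--                 if board[r][c] == value and (
--                         (r - 1, c) in marked or (r + 1, c) in marked
--                         or (r, c - 1) in marked or (r, c + 1) in marked):
--                     board[r][c] = -1
--                     marked.add((r, c))
--                     changed = True
--     shape = sorted(marked)
--     mr, mc = shape[0]
--     return [(r - mr, c - mc) for r, c in shape]
-- ===== Notes on version B (the rewrite author's own statement) =====
-- stated objective: alternative
-- what changed: A's BFS with a deque and parallel queue/shape append lists is replaced by queue-free fixpoint label propagation: rescan the whole board, marking any value-cell adjacent to an already-marked coordinate, until a pass changes nothing; the final sort makes the different visit order irrelevant.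
-- outside the precondition, e.g. on find_shape([[5]], 0, 0, -1): A returns [(0, 0)], B returns [(0, 0)]; on find_shape([[0, 5], [3]], 0, 0, 9): A returns [(0, 0)], B raises IndexError; on find_shape([[1, 2], [3]], 0, 0, 3): A raises IndexError, B raises IndexError
import Mathlib
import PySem

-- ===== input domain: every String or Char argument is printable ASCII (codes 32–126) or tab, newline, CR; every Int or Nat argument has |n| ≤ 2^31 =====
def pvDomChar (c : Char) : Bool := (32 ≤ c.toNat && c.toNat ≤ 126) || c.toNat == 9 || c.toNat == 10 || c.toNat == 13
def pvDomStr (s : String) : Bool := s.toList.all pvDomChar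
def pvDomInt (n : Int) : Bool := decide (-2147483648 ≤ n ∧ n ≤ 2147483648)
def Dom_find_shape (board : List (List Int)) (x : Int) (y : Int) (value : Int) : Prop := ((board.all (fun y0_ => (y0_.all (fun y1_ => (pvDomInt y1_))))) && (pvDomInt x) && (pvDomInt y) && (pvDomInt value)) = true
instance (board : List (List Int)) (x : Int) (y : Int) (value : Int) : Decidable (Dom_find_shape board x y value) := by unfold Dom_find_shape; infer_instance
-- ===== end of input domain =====

-- B replaces A's BFS (deque + parallel queue/shape append lists) by queue-free fixpoint
-- label propagation: rescan the whole board, marking any value-cell adjacent to an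
-- already-marked coordinate, until one full pass changes nothing; the final sort makes
-- the different visit order irrelevant.  Both A and B mutate `board` identically
-- (visited cells set to -1); the equivalence proved here is about the RETURN value.

-- board[i][j] as an Option (shared primitive of both ports)
def pvGetCell (b : List (List Int)) (i j : Int) : Option Int :=
  (PySem.List.pyGet? b i).bind fun row => PySem.List.pyGet? row j

-- board[i][j] = v with Python's negative-index semantics (board[i] then row[j] = v)
def pvSetCell (b : List (List Int)) (i j : Int) (v : Int) : List (List Int) :=
  match PySem.List.pyGet? b i with
  | some row => PySem.List.pySetD b i (PySem.List.pySetD row j v)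
  | none => b

-- shared tail of both Pythons: sort; normalize by the first (minimal) element
def pvNormalize (s : List (Int × Int)) : List (Int × Int) :=
  match s with
  | [] => []
  | (mx, my) :: _ => s.map fun p => (p.1 - mx, p.2 - my)

-- ===== PORT A =====
-- one direction (dx,dy) of A's inner `for` loop; state = (board, q, shape)
def pvStepA (n value r c : Int)
    (st : List (List Int) × List (Int × Int) × List (Int × Int)) (d : Int × Int) :
    List (List Int) × List (Int × Int) × List (Int × Int) :=
  let nx := d.1 + r
  let ny := d.2 + c
  if 0 ≤ nx ∧ nx < n ∧ 0 ≤ ny ∧ ny < n ∧ pvGetCell st.1 nx ny = some value then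
    (pvSetCell st.1 nx ny (-1), st.2.1 ++ [(nx, ny)], st.2.2 ++ [(nx, ny)])
  else st

-- A's `while q` loop (fuel only makes the recursion total; under Pre_ it never runs out)
def pvLoopA (n value : Int) :
    Nat → List (List Int) → List (Int × Int) → List (Int × Int) → List (Int × Int)
  | 0, _, _, shape => shape
  | _ + 1, _, [], shape => shape
  | fuel + 1, b, (r, c) :: q, shape =>
      let st := [((-1 : Int), (0 : Int)), (1, 0), (0, -1), (0, 1)].foldl
        (pvStepA n value r c) (b, q, shape)
      pvLoopA n value fuel st.1 st.2.1 st.2.2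

def find_shape (board : List (List Int)) (x : Int) (y : Int) (value : Int) : List (Int × Int) :=
  let n : Int := board.length
  let b := pvSetCell board x y (-1)
  let shape := pvLoopA n value (board.length * board.length + 1) b [(x, y)] [(x, y)]
  pvNormalize (PySem.List.sorted2 shape Prod.fst Prod.snd)

-- ===== PORT B =====
-- body of B's innermost `if`: one scanned cell (r,c); state = (board, marked, changed)
def pvScanCell (value : Int)
    (st : List (List Int) × List (Int × Int) × Bool) (r c : Int) :
    List (List Int) × List (Int × Int) × Bool :=
  if pvGetCell st.1 r c = some value ∧
      (PySem.Set.contains st.2.1 (r - 1, c) = true ∨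
       PySem.Set.contains st.2.1 (r + 1, c) = true ∨
       PySem.Set.contains st.2.1 (r, c - 1) = true ∨
       PySem.Set.contains st.2.1 (r, c + 1) = true) then
    (pvSetCell st.1 r c (-1), PySem.Set.add st.2.1 (r, c), true)
  else st

-- B's `for r in range(n): for c in range(n): …` (one full scan of the board)
def pvPass (n value : Int) (st : List (List Int) × List (Int × Int) × Bool) :
    List (List Int) × List (Int × Int) × Bool :=
  (PySem.List.pyRange 0 n 1).foldl
    (fun st r =>
      (PySem.List.pyRange 0 n 1).foldl (fun st c => pvScanCell value st r c) st)
    st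

-- B's `while changed` loop (fuel only makes the recursion total; under Pre_ it never runs out)
def pvScanLoop (n value : Int) :
    Nat → List (List Int) → List (Int × Int) → List (Int × Int)
  | 0, _, marked => marked
  | fuel + 1, b, marked =>
      let st := pvPass n value (b, marked, false)
      if st.2.2 then pvScanLoop n value fuel st.1 st.2.1 else st.2.1

def find_shape_alt (board : List (List Int)) (x : Int) (y : Int) (value : Int) : List (Int × Int) :=
  let n : Int := board.length
  let b := pvSetCell board x y (-1)
  let marked := pvScanLoop n value (board.length * board.length + 2) b [(x, y)]
  pvNormalize (PySem.List.sorted2 marked Prod.fst Prod.snd)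

-- ===== PRECONDITION & SPEC =====
-- Pre_ excludes boards with a row shorter than the row count and out-of-range starts
-- (both can raise IndexError) and value = -1 (A re-enqueues already-visited cells, which
-- equal the -1 marker, and loops forever whenever the region has an in-range neighbour).
def Pre_find_shape (board : List (List Int)) (x : Int) (y : Int) (value : Int) : Prop :=
  (∀ row ∈ board, board.length ≤ row.length) ∧
  -(board.length : Int) ≤ x ∧ x < board.length ∧
  -(board.length : Int) ≤ y ∧ y < board.length ∧ value ≠ -1
instance (board : List (List Int)) (x : Int) (y : Int) (value : Int) : Decidable (Pre_find_shape board x y value) := by unfold Pre_find_shape; infer_instance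

def pvWitness_find_shape : List (List Int) × Int × Int × Int := ([[1, 2], [1, 1]], 0, 0, 1)

def Spec_find_shape (board : List (List Int)) (x : Int) (y : Int) (value : Int) (out : List (Int × Int)) : Prop := out = find_shape_alt board x y value
instance (board : List (List Int)) (x : Int) (y : Int) (value : Int) (out : List (Int × Int)) : Decidable (Spec_find_shape board x y value out) := by unfold Spec_find_shape; infer_instance

-- ===== CLAIM (what is proved, stated in full; the proofs are below) =====
def Claim_equal_find_shape : Prop := ∀ (board : List (List Int)) (x : Int) (y : Int) (value : Int), Dom_find_shape board x y value → Pre_find_shape board x y value → Spec_find_shape board x y value (find_shape board x y value)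

-- ===== LEMMAS AND PROOFS =====

-- in-range coordinates
def pvInR (n : Int) (p : Int × Int) : Prop := 0 ≤ p.1 ∧ p.1 < n ∧ 0 ≤ p.2 ∧ p.2 < n

def pvNbrs (p : Int × Int) : List (Int × Int) :=
  [(p.1 - 1, p.2), (p.1 + 1, p.2), (p.1, p.2 - 1), (p.1, p.2 + 1)]

-- cells flood fill reaches from (x,y) on the ORIGINAL board
inductive pvReach (board : List (List Int)) (value x y : Int) : Int × Int → Prop
  | base : pvReach board value x y (x, y)
  | step (p q : Int × Int) : pvReach board value x y p → q ∈ pvNbrs p →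
      pvInR board.length q → pvGetCell board q.1 q.2 = some value →
      pvReach board value x y q

-- "b is board with exactly the cells of S overwritten by -1" (on in-range cells)
def pvMarked (board b : List (List Int)) (S : List (Int × Int)) : Prop :=
  ∀ p : Int × Int, pvInR board.length p →
    pvGetCell b p.1 p.2 = if p ∈ S then some (-1) else pvGetCell board p.1 p.2

-- proof-side single-cell step for A, plain-append accumulator
def pvStepC (n value : Int)
    (st : List (List Int) × List (Int × Int)) (p : Int × Int) :
    List (List Int) × List (Int × Int) :=
  if 0 ≤ p.1 ∧ p.1 < n ∧ 0 ≤ p.2 ∧ p.2 < n ∧ pvGetCell st.1 p.1 p.2 = some value then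
    (pvSetCell st.1 p.1 p.2 (-1), st.2 ++ [p])
  else st

def pvCells (n : Nat) : List (Int × Int) :=
  (List.range n).flatMap fun (i : Nat) => (List.range n).map fun (j : Nat) => ((i : Int), (j : Int))

-- ---- cell get/set lemmas ----

lemma pvGetCell_nonneg (b : List (List Int)) (i j : Int) (hi : 0 ≤ i) :
    pvGetCell b i j = (b[i.toNat]?).bind fun row => PySem.List.pyGet? row j := by
  rw [pvGetCell, PySem.List.pyGet?_of_nonneg _ hi]

lemma pvSetCell_of_nonneg (b : List (List Int)) (i j v : Int) (hi : 0 ≤ i) (hj : 0 ≤ j)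
    (row : List Int) (hrow : b[i.toNat]? = some row) :
    pvSetCell b i j v = b.set i.toNat (row.set j.toNat v) := by
  simp only [pvSetCell, PySem.List.pyGet?_of_nonneg _ hi, hrow]
  rw [PySem.List.pySetD_of_nonneg _ _ hj, PySem.List.pySetD_of_nonneg _ _ hi]

lemma pvSetCell_none (b : List (List Int)) (i j v : Int) (hi : 0 ≤ i)
    (hrow : b[i.toNat]? = none) : pvSetCell b i j v = b := by
  simp only [pvSetCell, PySem.List.pyGet?_of_nonneg _ hi, hrow]

lemma pvGetCell_set_same (b : List (List Int)) (i j : Int) (v w : Int)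
    (hi : 0 ≤ i) (hj : 0 ≤ j) (h : pvGetCell b i j = some w) :
    pvGetCell (pvSetCell b i j v) i j = some v := by
  rw [pvGetCell_nonneg _ _ _ hi] at h ⊢
  rcases hrow : b[i.toNat]? with _ | row
  · rw [hrow] at h; simp at h
  · rw [hrow] at h
    simp only [Option.bind_some] at h
    rw [PySem.List.pyGet?_of_nonneg _ hj] at h
    have hjlt : j.toNat < row.length := by
      by_contra hc
      rw [List.getElem?_eq_none (by omega)] at h; simp at h
    have hilt : i.toNat < b.length := by
      by_contra hc
      rw [List.getElem?_eq_none (by omega)] at hrow; simp at hrow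
    rw [pvSetCell_of_nonneg b i j v hi hj row hrow]
    rw [List.getElem?_set_self (by simpa using hilt)]
    simp only [Option.bind_some]
    rw [PySem.List.pyGet?_of_nonneg _ hj]
    rw [List.getElem?_set_self (by simpa using hjlt)]

lemma pvGetCell_set_other (b : List (List Int)) (i j : Int) (v : Int) (p q : Int)
    (hi : 0 ≤ i) (hj : 0 ≤ j) (hp : 0 ≤ p) (hq : 0 ≤ q) (hne : (p, q) ≠ (i, j)) :
    pvGetCell (pvSetCell b i j v) p q = pvGetCell b p q := by
  rw [pvGetCell_nonneg _ _ _ hp, pvGetCell_nonneg _ _ _ hp]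
  rcases hrow : b[i.toNat]? with _ | row
  · rw [pvSetCell_none b i j v hi hrow]
  · rw [pvSetCell_of_nonneg b i j v hi hj row hrow]
    by_cases hpi : p = i
    · subst hpi
      have hilt : p.toNat < b.length := by
        by_contra hc
        rw [List.getElem?_eq_none (by omega)] at hrow; simp at hrow
      have hqj : q ≠ j := by intro hh; exact hne (by rw [hh])
      rw [List.getElem?_set_self hilt, hrow]
      simp only [Option.bind_some]
      rw [PySem.List.pyGet?_of_nonneg _ hq, PySem.List.pyGet?_of_nonneg _ hq]
      rw [List.getElem?_set_ne (by omega)]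
    · rw [List.getElem?_set_ne (by omega)]

lemma pvGetCell_square (board : List (List Int)) (p : Int × Int)
    (hsq : ∀ row ∈ board, board.length ≤ row.length)
    (hp : pvInR board.length p) : ∃ w, pvGetCell board p.1 p.2 = some w := by
  obtain ⟨h1, h2, h3, h4⟩ := hp
  rw [pvGetCell_nonneg _ _ _ h1]
  have hlt : p.1.toNat < board.length := by omega
  rw [List.getElem?_eq_getElem hlt]
  simp only [Option.bind_some]
  rw [PySem.List.pyGet?_of_nonneg _ h3]
  have hrl := hsq _ (List.getElem_mem hlt)
  have : p.2.toNat < board[p.1.toNat].length := by omega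
  exact ⟨_, List.getElem?_eq_getElem this⟩

-- ---- counting cells ----

lemma pvCells_length (n : Nat) : (pvCells n).length = n * n := by
  simp [pvCells, List.length_flatMap]

lemma pvCells_mem (n : Nat) (p : Int × Int) (h : pvInR n p) : p ∈ pvCells n := by
  obtain ⟨h1, h2, h3, h4⟩ := h
  rw [pvCells, List.mem_flatMap]
  refine ⟨p.1.toNat, ?_, ?_⟩
  · rw [List.mem_range]; omega
  · rw [List.mem_map]
    refine ⟨p.2.toNat, ?_, ?_⟩
    · rw [List.mem_range]; omega
    · have e1 : ((p.1.toNat : Nat) : Int) = p.1 := by omega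
      have e2 : ((p.2.toNat : Nat) : Int) = p.2 := by omega
      rw [e1, e2]

lemma pvCells_inR (n : Nat) (p : Int × Int) (h : p ∈ pvCells n) : pvInR n p := by
  rw [pvCells, List.mem_flatMap] at h
  obtain ⟨i, hi, hmem⟩ := h
  rw [List.mem_map] at hmem
  obtain ⟨j, hj, hp⟩ := hmem
  rw [List.mem_range] at hi
  rw [List.mem_range] at hj
  subst hp
  exact ⟨by omega, by omega, by omega, by omega⟩

lemma pvLen_le (n : Nat) (w : Int × Int) (S : List (Int × Int)) (hnd : S.Nodup)
    (h : ∀ p ∈ S, pvInR n p ∨ p = w) : S.length ≤ n * n + 1 := by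
  have hsub : S ⊆ w :: pvCells n := by
    intro p hp
    rcases h p hp with hin | rfl
    · exact List.mem_cons_of_mem _ (pvCells_mem n p hin)
    · exact List.mem_cons_self
  have := (List.subperm_of_subset hnd hsub).length_le
  simpa [pvCells_length] using this

-- ---- marking ----

lemma pvMarked_step (board b : List (List Int)) (value : Int) (S : List (Int × Int))
    (p : Int × Int) (hm : pvMarked board b S) (hp : pvInR board.length p)
    (hv : pvGetCell b p.1 p.2 = some value) :
    pvMarked board (pvSetCell b p.1 p.2 (-1)) (S ++ [p]) := by
  intro t ht
  by_cases htp : t = p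
  · subst htp
    rw [pvGetCell_set_same b t.1 t.2 (-1) value hp.1 hp.2.2.1 hv]
    simp
  · have hne : (t.1, t.2) ≠ (p.1, p.2) := by
      intro hc; exact htp (Prod.ext (congrArg Prod.fst hc) (congrArg Prod.snd hc))
    rw [pvGetCell_set_other b p.1 p.2 (-1) t.1 t.2 hp.1 hp.2.2.1 ht.1 ht.2.2.1 hne]
    rw [hm t ht]
    simp [htp]

lemma pvNotMem_of_value (board b : List (List Int)) (value : Int) (S : List (Int × Int))
    (p : Int × Int) (hval : value ≠ -1) (hm : pvMarked board b S) (hp : pvInR board.length p)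
    (hv : pvGetCell b p.1 p.2 = some value) : p ∉ S ∧ pvGetCell board p.1 p.2 = some value := by
  have hmp := hm p hp
  by_cases hps : p ∈ S
  · rw [if_pos hps] at hmp
    rw [hmp] at hv
    exact absurd (Option.some.inj hv).symm hval
  · rw [if_neg hps] at hmp
    exact ⟨hps, hmp ▸ hv⟩

-- ---- the master fold lemma for A's neighbour scan ----

lemma pvFoldC (board : List (List Int)) (value : Int) (hval : value ≠ -1) :
    ∀ (cs : List (Int × Int)) (b : List (List Int)) (acc S : List (Int × Int)),
    pvMarked board b S →
    ∃ Δ b',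
      cs.foldl (pvStepC board.length value) (b, acc) = (b', acc ++ Δ) ∧
      pvMarked board b' (S ++ Δ) ∧
      (∀ δ ∈ Δ, δ ∈ cs ∧ pvInR board.length δ ∧
        pvGetCell board δ.1 δ.2 = some value ∧ δ ∉ S) ∧
      Δ.Nodup ∧
      (∀ c ∈ cs, pvInR board.length c → pvGetCell board c.1 c.2 = some value → c ∈ S ++ Δ) := by
  intro cs
  induction cs with
  | nil =>
    intro b acc S hm
    exact ⟨[], b, by simp, by simpa using hm, by simp, by simp, by simp⟩
  | cons c cs ih =>
    intro b acc S hm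
    by_cases hg : 0 ≤ c.1 ∧ c.1 < (board.length : Int) ∧ 0 ≤ c.2 ∧
        c.2 < (board.length : Int) ∧ pvGetCell b c.1 c.2 = some value
    · have hinR : pvInR board.length c := ⟨hg.1, hg.2.1, hg.2.2.1, hg.2.2.2.1⟩
      have hv := hg.2.2.2.2
      obtain ⟨hnotS, hO⟩ := pvNotMem_of_value board b value S c hval hm hinR hv
      have hm1 := pvMarked_step board b value S c hm hinR hv
      obtain ⟨Δ, b', heq, hm', hδ, hnd, hhand⟩ :=
        ih (pvSetCell b c.1 c.2 (-1)) (acc ++ [c]) (S ++ [c]) hm1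
      refine ⟨c :: Δ, b', ?_, ?_, ?_, ?_, ?_⟩
      · rw [List.foldl_cons]
        have hstep : pvStepC (board.length) value (b, acc) c =
            (pvSetCell b c.1 c.2 (-1), acc ++ [c]) := by
          simp only [pvStepC]; rw [if_pos hg]
        rw [hstep, heq]
        simp
      · have : S ++ c :: Δ = (S ++ [c]) ++ Δ := by simp
        rw [this]; exact hm'
      · intro δ hδm
        rcases List.mem_cons.mp hδm with hδc | hmem
        · subst hδc; exact ⟨List.mem_cons_self, hinR, hO, hnotS⟩
        · obtain ⟨h1, h2, h3, h4⟩ := hδ δ hmem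
          exact ⟨List.mem_cons_of_mem _ h1, h2, h3, fun hc => h4 (by simp [hc])⟩
      · refine List.nodup_cons.mpr ⟨?_, hnd⟩
        intro hc
        exact (hδ c hc).2.2.2 (by simp)
      · intro d hd hdin hdval
        rcases List.mem_cons.mp hd with hdc | hmem
        · subst hdc; simp
        · have := hhand d hmem hdin hdval
          simp only [List.append_assoc, List.singleton_append] at this
          exact this
    · obtain ⟨Δ, b', heq, hm', hδ, hnd, hhand⟩ := ih b acc S hm
      refine ⟨Δ, b', ?_, hm', ?_, hnd, ?_⟩
      · rw [List.foldl_cons]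
        have hstep : pvStepC (board.length) value (b, acc) c = (b, acc) := by
          simp only [pvStepC]; rw [if_neg hg]
        rw [hstep, heq]
      · intro δ hmem
        obtain ⟨h1, h2, h3, h4⟩ := hδ δ hmem
        exact ⟨List.mem_cons_of_mem _ h1, h2, h3, h4⟩
      · intro d hd hdin hdval
        rcases List.mem_cons.mp hd with hdc | hmem
        · subst hdc
          by_cases hdS : d ∈ S
          · exact List.mem_append_left _ hdS
          · exfalso
            have hmd := hm d hdin
            rw [if_neg hdS] at hmd
            exact hg ⟨hdin.1, hdin.2.1, hdin.2.2.1, hdin.2.2.2, hmd.trans hdval⟩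
        · exact hhand d hmem hdin hdval

-- ---- bridge from A's fold to pvStepC ----

lemma pvStepC_acc (n value : Int) (cs : List (Int × Int)) :
    ∀ (b : List (List Int)) (acc : List (Int × Int)),
    cs.foldl (pvStepC n value) (b, acc) =
      ((cs.foldl (pvStepC n value) (b, [])).1, acc ++ (cs.foldl (pvStepC n value) (b, [])).2) := by
  induction cs with
  | nil => intro b acc; simp
  | cons c cs ih =>
    intro b acc
    rw [List.foldl_cons, List.foldl_cons]
    by_cases hg : 0 ≤ c.1 ∧ c.1 < n ∧ 0 ≤ c.2 ∧ c.2 < n ∧ pvGetCell b c.1 c.2 = some value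
    · have h1 : pvStepC n value (b, acc) c = (pvSetCell b c.1 c.2 (-1), acc ++ [c]) := by
        simp only [pvStepC]; rw [if_pos hg]
      have h2 : pvStepC n value (b, []) c = (pvSetCell b c.1 c.2 (-1), [c]) := by
        simp only [pvStepC]; rw [if_pos hg]; simp
      rw [h1, h2, ih _ (acc ++ [c]), ih _ [c]]
      simp
    · have h1 : pvStepC n value (b, acc) c = (b, acc) := by
        simp only [pvStepC]; rw [if_neg hg]
      have h2 : pvStepC n value (b, []) c = (b, []) := by
        simp only [pvStepC]; rw [if_neg hg]
      rw [h1, h2, ih _ acc]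

lemma pvBridgeA (n value r c : Int) (ds : List (Int × Int)) :
    ∀ (b : List (List Int)) (q shape : List (Int × Int)),
    ds.foldl (pvStepA n value r c) (b, q, shape) =
      (((ds.map fun d => (d.1 + r, d.2 + c)).foldl (pvStepC n value) (b, [])).1,
       q ++ ((ds.map fun d => (d.1 + r, d.2 + c)).foldl (pvStepC n value) (b, [])).2,
       shape ++ ((ds.map fun d => (d.1 + r, d.2 + c)).foldl (pvStepC n value) (b, [])).2) := by
  induction ds with
  | nil => intro b q shape; simp
  | cons d ds ih =>
    intro b q shape
    rw [List.map_cons, List.foldl_cons, List.foldl_cons]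
    by_cases hg : 0 ≤ d.1 + r ∧ d.1 + r < n ∧ 0 ≤ d.2 + c ∧ d.2 + c < n ∧
        pvGetCell b (d.1 + r) (d.2 + c) = some value
    · have h1 : pvStepA n value r c (b, q, shape) d =
          (pvSetCell b (d.1 + r) (d.2 + c) (-1), q ++ [(d.1 + r, d.2 + c)],
            shape ++ [(d.1 + r, d.2 + c)]) := by
        simp only [pvStepA]; rw [if_pos hg]
      have h2 : pvStepC n value (b, []) (d.1 + r, d.2 + c) =
          (pvSetCell b (d.1 + r) (d.2 + c) (-1), [(d.1 + r, d.2 + c)]) := by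
        simp only [pvStepC]; rw [if_pos hg]; simp
      rw [h1, h2, ih, pvStepC_acc n value (ds.map fun d => (d.1 + r, d.2 + c)) _ [(d.1 + r, d.2 + c)]]
      simp
    · have h1 : pvStepA n value r c (b, q, shape) d = (b, q, shape) := by
        simp only [pvStepA]; rw [if_neg hg]
      have h2 : pvStepC n value (b, []) (d.1 + r, d.2 + c) = (b, []) := by
        simp only [pvStepC]; rw [if_neg hg]
      rw [h1, h2, ih]

-- ---- A's loop invariant ----

def pvGood (board : List (List Int)) (value x y : Int) (R : List (Int × Int)) : Prop :=
  R.Nodup ∧ (x, y) ∈ R ∧ (∀ p ∈ R, pvReach board value x y p) ∧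
  (∀ p ∈ R, ∀ t ∈ pvNbrs p, pvInR board.length t →
    pvGetCell board t.1 t.2 = some value → t ∈ R)

lemma pvLoopA_spec (board : List (List Int)) (value x y : Int) (hval : value ≠ -1) :
    ∀ (fuel : Nat) (b : List (List Int)) (q shape : List (Int × Int)),
    pvMarked board b shape →
    (∀ p ∈ q, p ∈ shape) →
    (∀ p ∈ shape, p ∉ q → ∀ t ∈ pvNbrs p, pvInR board.length t →
      pvGetCell board t.1 t.2 = some value → t ∈ shape) →
    (∀ p ∈ shape, pvReach board value x y p) →
    shape.Nodup →
    (x, y) ∈ shape →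
    (∀ p ∈ shape, pvInR board.length p ∨ p = (x, y)) →
    (board.length * board.length + 1 - shape.length) + q.length ≤ fuel →
    pvGood board value x y (pvLoopA board.length value fuel b q shape) := by
  intro fuel
  induction fuel with
  | zero =>
    intro b q shape hm hq hcl hr hnd hxy hin hfuel
    have hq0 : q = [] := List.eq_nil_of_length_eq_zero (by omega)
    subst hq0
    exact ⟨hnd, hxy, hr, fun p hp t => hcl p hp (by simp) t⟩
  | succ fuel ih =>
    intro b q shape hm hq hcl hr hnd hxy hin hfuel
    rcases q with _ | ⟨⟨r, c⟩, q'⟩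
    · exact ⟨hnd, hxy, hr, fun p hp t => hcl p hp (by simp) t⟩
    · have hcells : ([((-1 : Int), (0 : Int)), (1, 0), (0, -1), (0, 1)].map
          fun d => (d.1 + r, d.2 + c)) = pvNbrs (r, c) := by
        simp [pvNbrs, Prod.ext_iff]
        omega
      show pvGood board value x y (pvLoopA (board.length) value (fuel + 1) b ((r, c) :: q') shape)
      rw [pvLoopA, pvBridgeA, hcells]
      obtain ⟨Δ, b', heq, hm', hδ, hndΔ, hhand⟩ :=
        pvFoldC board value hval (pvNbrs (r, c)) b [] shape hm
      simp only [List.nil_append] at heq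
      rw [heq]
      have hrc : (r, c) ∈ shape := hq _ List.mem_cons_self
      have hdisj : ∀ a ∈ shape, a ∉ Δ := fun a ha hb => (hδ _ hb).2.2.2 ha
      have hnd' : (shape ++ Δ).Nodup :=
        List.nodup_append.mpr ⟨hnd, hndΔ, fun a ha b hb he => by subst he; exact hdisj a ha hb⟩
      have hin' : ∀ p ∈ shape ++ Δ, pvInR board.length p ∨ p = (x, y) := by
        intro p hp
        rcases List.mem_append.mp hp with h | h
        exacts [hin p h, Or.inl (hδ p h).2.1]
      have hlen : (shape ++ Δ).length ≤ board.length * board.length + 1 :=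
        pvLen_le board.length (x, y) _ hnd' hin'
      apply ih b' (q' ++ Δ) (shape ++ Δ) hm'
      · intro p hp
        rcases List.mem_append.mp hp with h | h
        exacts [List.mem_append_left _ (hq _ (List.mem_cons_of_mem _ h)),
          List.mem_append_right _ h]
      · intro p hp hpq t ht htin htval
        rcases List.mem_append.mp hp with hps | hpΔ
        · by_cases hprc : p = (r, c)
          · subst hprc
            exact hhand t ht htin htval
          · have hpq' : p ∉ (r, c) :: q' := by
              intro hc
              rcases List.mem_cons.mp hc with h | h
              exacts [hprc h, hpq (List.mem_append_left _ h)]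
            exact List.mem_append_left _ (hcl p hps hpq' t ht htin htval)
        · exact absurd (List.mem_append_right q' hpΔ) hpq
      · intro p hp
        rcases List.mem_append.mp hp with h | h
        · exact hr p h
        · obtain ⟨h1, h2, h3, _⟩ := hδ p h
          exact pvReach.step (r, c) p (hr _ hrc) h1 h2 h3
      · exact hnd'
      · exact List.mem_append_left _ hxy
      · exact hin'
      · simp only [List.length_append, List.length_cons] at hlen hfuel ⊢
        omega

-- ---- B's pass and loop ----

-- the invariant carried through B's scan
def pvInv (B : List (List Int)) (value x y : Int)
    (b : List (List Int)) (m : List (Int × Int)) : Prop :=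
  pvMarked B b m ∧ m.Nodup ∧ (x, y) ∈ m ∧ (∀ p ∈ m, pvReach B value x y p) ∧
  (∀ p ∈ m, pvInR B.length p ∨ p = (x, y))

-- B's firing condition at a cell, as a Prop
def pvCond (b : List (List Int)) (m : List (Int × Int)) (value : Int) (rc : Int × Int) : Prop :=
  pvGetCell b rc.1 rc.2 = some value ∧
    ((rc.1 - 1, rc.2) ∈ m ∨ (rc.1 + 1, rc.2) ∈ m ∨ (rc.1, rc.2 - 1) ∈ m ∨ (rc.1, rc.2 + 1) ∈ m)

lemma pvNbr_mem_cond (m : List (Int × Int)) (p t : Int × Int) (hp : p ∈ m)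
    (ht : t ∈ pvNbrs p) :
    (t.1 - 1, t.2) ∈ m ∨ (t.1 + 1, t.2) ∈ m ∨ (t.1, t.2 - 1) ∈ m ∨ (t.1, t.2 + 1) ∈ m := by
  have hsym : p ∈ pvNbrs t := by
    simp [pvNbrs, Prod.ext_iff] at ht ⊢
    omega
  simp only [pvNbrs, List.mem_cons, List.not_mem_nil, or_false] at hsym
  rcases hsym with rfl | rfl | rfl | rfl
  exacts [Or.inl hp, Or.inr (Or.inl hp), Or.inr (Or.inr (Or.inl hp)), Or.inr (Or.inr (Or.inr hp))]

lemma pvCond_nbr (m : List (Int × Int)) (t : Int × Int)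
    (h : (t.1 - 1, t.2) ∈ m ∨ (t.1 + 1, t.2) ∈ m ∨ (t.1, t.2 - 1) ∈ m ∨ (t.1, t.2 + 1) ∈ m) :
    ∃ p ∈ m, t ∈ pvNbrs p := by
  rcases h with h | h | h | h <;>
    exact ⟨_, h, by simp [pvNbrs, Prod.ext_iff]⟩

-- the port's Bool test agrees with pvCond
lemma pvScanCell_cond_iff (b : List (List Int)) (m : List (Int × Int)) (value r c : Int) :
    (pvGetCell b r c = some value ∧
      (PySem.Set.contains m (r - 1, c) = true ∨ PySem.Set.contains m (r + 1, c) = true ∨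
       PySem.Set.contains m (r, c - 1) = true ∨ PySem.Set.contains m (r, c + 1) = true)) ↔
    pvCond b m value (r, c) := by
  simp [pvCond]

-- one scanned cell preserves the invariant (and fires exactly on pvCond)
lemma pvScanCell_spec (B : List (List Int)) (value x y : Int) (hval : value ≠ -1)
    (b : List (List Int)) (m : List (Int × Int)) (ch : Bool) (r c : Int)
    (hin : pvInR B.length (r, c)) (hInv : pvInv B value x y b m) :
    (¬ pvCond b m value (r, c) ∧ pvScanCell value (b, m, ch) r c = (b, m, ch)) ∨
    (pvCond b m value (r, c) ∧
      pvScanCell value (b, m, ch) r c = (pvSetCell b r c (-1), m ++ [(r, c)], true) ∧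
      pvInv B value x y (pvSetCell b r c (-1)) (m ++ [(r, c)])) := by
  obtain ⟨hm, hnd, hxy, hr, hrange⟩ := hInv
  by_cases hc : pvCond b m value (r, c)
  · right
    obtain ⟨hget, hnbr⟩ := hc
    obtain ⟨hnotm, hO⟩ := pvNotMem_of_value B b value m (r, c) hval hm hin hget
    have hadd : PySem.Set.add m (r, c) = m ++ [(r, c)] := by
      simp [PySem.Set.add, PySem.Set.contains]
      intro hcc
      exact absurd hcc hnotm
    refine ⟨⟨hget, hnbr⟩, ?_, ?_, ?_, ?_, ?_, ?_⟩
    · simp only [pvScanCell]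
      rw [if_pos ((pvScanCell_cond_iff b m value r c).mpr ⟨hget, hnbr⟩), hadd]
    · exact pvMarked_step B b value m (r, c) hm hin hget
    · refine hnd.append (List.nodup_singleton _) ?_
      intro a ham hb
      rw [List.mem_singleton] at hb
      subst hb
      exact hnotm ham
    · exact List.mem_append_left _ hxy
    · intro p hp
      rcases List.mem_append.mp hp with h | h
      · exact hr p h
      · rw [List.mem_singleton.mp h]
        obtain ⟨p', hp'm, hp'n⟩ := pvCond_nbr m (r, c) hnbr
        exact pvReach.step p' (r, c) (hr p' hp'm) hp'n hin hO
    · intro p hp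
      rcases List.mem_append.mp hp with h | h
      · exact hrange p h
      · rw [List.mem_singleton.mp h]; exact Or.inl hin
  · left
    refine ⟨hc, ?_⟩
    simp only [pvScanCell]
    rw [if_neg (fun hh => hc ((pvScanCell_cond_iff b m value r c).mp hh))]

-- generic fold over flatMap (used to flatten B's nested range loops)
lemma pvFoldlFlatMap {α β γ : Type} (l : List α) (g : α → List β) (f : γ → β → γ) (s : γ) :
    (l.flatMap g).foldl f s = l.foldl (fun s a => (g a).foldl f s) s := by
  induction l generalizing s with
  | nil => rfl
  | cons a l ih => simp [List.flatMap_cons, List.foldl_append, ih]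

-- B's pass IS the fold of pvScanCell over all cells of the board
lemma pvPass_eq (N : Nat) (value : Int) (st : List (List Int) × List (Int × Int) × Bool) :
    pvPass (N : Int) value st =
      (pvCells N).foldl (fun st rc => pvScanCell value st rc.1 rc.2) st := by
  have hr : PySem.List.pyRange 0 (N : Int) 1 = (List.range N).map (fun (k : Nat) => (k : Int)) := by
    rw [PySem.List.pyRange_one]
    simp
  rw [pvPass, hr, pvCells, pvFoldlFlatMap]
  simp only [List.foldl_map]

-- the whole-pass fold: invariant preserved; no firing ⇒ no condition held anywhere
lemma pvPassFoldCells (B : List (List Int)) (value x y : Int) (hval : value ≠ -1) :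
    ∀ (cells : List (Int × Int)), (∀ rc ∈ cells, pvInR B.length rc) →
    ∀ (b : List (List Int)) (m : List (Int × Int)) (ch : Bool),
    pvInv B value x y b m →
    ∃ Δ b',
      cells.foldl (fun st rc => pvScanCell value st rc.1 rc.2) (b, m, ch) =
        (b', m ++ Δ, ch || !Δ.isEmpty) ∧
      pvInv B value x y b' (m ++ Δ) ∧
      (Δ = [] → b' = b ∧ ∀ rc ∈ cells, ¬ pvCond b m value rc) := by
  intro cells
  induction cells with
  | nil =>
    intro _ b m ch hInv
    exact ⟨[], b, by simp, by simpa using hInv, fun _ => ⟨rfl, by simp⟩⟩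
  | cons rc cells ih =>
    intro hcs b m ch hInv
    have hin : pvInR B.length rc := hcs rc List.mem_cons_self
    have hin' : pvInR B.length (rc.1, rc.2) := hin
    rcases pvScanCell_spec B value x y hval b m ch rc.1 rc.2 hin' hInv with
      ⟨hnc, hstep⟩ | ⟨hc, hstep, hInv'⟩
    · obtain ⟨Δ, b', heq, hInv'', hnil⟩ := ih (fun c hc => hcs c (List.mem_cons_of_mem _ hc)) b m ch hInv
      refine ⟨Δ, b', ?_, hInv'', ?_⟩
      · rw [List.foldl_cons, hstep, heq]
      · intro h0
        obtain ⟨hb, hall⟩ := hnil h0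
        refine ⟨hb, ?_⟩
        intro c hcm
        rcases List.mem_cons.mp hcm with rfl | hmem
        · exact hnc
        · exact hall c hmem
    · obtain ⟨Δ, b', heq, hInv'', _⟩ :=
        ih (fun c hc => hcs c (List.mem_cons_of_mem _ hc))
          (pvSetCell b rc.1 rc.2 (-1)) (m ++ [(rc.1, rc.2)]) true hInv'
      refine ⟨(rc.1, rc.2) :: Δ, b', ?_, ?_, ?_⟩
      · rw [List.foldl_cons, hstep, heq]
        simp
      · simpa using hInv''
      · intro h0; exact absurd h0 (by simp)

-- B's while-loop reaches the closed fixpoint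
lemma pvScanLoop_spec (B : List (List Int)) (value x y : Int) (hval : value ≠ -1) :
    ∀ (fuel : Nat) (b : List (List Int)) (m : List (Int × Int)),
    pvInv B value x y b m →
    B.length * B.length + 2 - m.length ≤ fuel →
    pvGood B value x y (pvScanLoop B.length value fuel b m) := by
  intro fuel
  induction fuel with
  | zero =>
    intro b m hInv hfuel
    exfalso
    have := pvLen_le B.length (x, y) m hInv.2.1 hInv.2.2.2.2
    omega
  | succ fuel ih =>
    intro b m hInv hfuel
    show pvGood B value x y (pvScanLoop (B.length) value (fuel + 1) b m)
    rw [pvScanLoop, pvPass_eq B.length]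
    obtain ⟨Δ, b', heq, hInv', hnil⟩ :=
      pvPassFoldCells B value x y hval (pvCells B.length) (pvCells_inR B.length) b m false hInv
    rw [heq]
    rcases hΔ : Δ with _ | ⟨d, Δ'⟩
    · subst hΔ
      obtain ⟨hb, hall⟩ := hnil rfl
      simp only [List.isEmpty_nil, Bool.not_true, Bool.or_self, Bool.false_eq_true,
        if_false, List.append_nil]
      obtain ⟨hm, hnd, hxy, hr, hrange⟩ := hInv
      refine ⟨hnd, hxy, hr, ?_⟩
      intro p hp t ht htin htval
      by_contra htm
      have hget : pvGetCell b t.1 t.2 = some value := by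
        have hh := hm t htin
        rw [if_neg htm] at hh
        rw [hh]; exact htval
      exact hall t (pvCells_mem B.length t htin)
        ⟨hget, pvNbr_mem_cond m p t hp ht⟩
    · subst hΔ
      simp only [List.isEmpty_cons, Bool.not_false, Bool.or_true, if_true]
      apply ih b' (m ++ d :: Δ') hInv'
      have hlen := pvLen_le B.length (x, y) (m ++ d :: Δ') hInv'.2.1 hInv'.2.2.2.2
      simp only [List.length_append, List.length_cons] at hlen ⊢
      omega

-- ---- pvGood determines the member set ----

lemma pvGood_mem (board : List (List Int)) (value x y : Int) (R : List (Int × Int))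
    (h : pvGood board value x y R) : ∀ p, p ∈ R ↔ pvReach board value x y p := by
  intro p
  constructor
  · exact h.2.2.1 p
  · intro hr
    induction hr with
    | base => exact h.2.1
    | step p q hp hmem hin hval ih => exact h.2.2.2 p ih q hmem hin hval

-- ---- Python sort of a list of int pairs is determined by the multiset ----

lemma pvInsertBy_pairwise (before : (Int × Int) → (Int × Int) → Bool)
    (hirr : ∀ a, before a a = false)
    (htr : ∀ a b c, before a b = true → before b c = true → before a c = true)
    (x : Int × Int) (ys : List (Int × Int))
    (h : ys.Pairwise fun a b => before b a = false) :
    (PySem.List.insertBy before x ys).Pairwise (fun a b => before b a = false) := by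
  induction ys with
  | nil => simp [PySem.List.insertBy]
  | cons y ys ih =>
    rw [PySem.List.insertBy]
    by_cases hg : before x y = true
    · rw [if_pos hg]
      refine List.pairwise_cons.mpr ⟨?_, h⟩
      intro z hz
      rcases List.mem_cons.mp hz with hzy | hzs
      · subst hzy
        by_contra hc
        simp only [Bool.not_eq_false] at hc
        exact absurd (htr z x z hc hg) (by simp [hirr])
      · by_contra hc
        simp only [Bool.not_eq_false] at hc
        have := htr z x y hc hg
        have h2 := (List.pairwise_cons.mp h).1 z hzs
        rw [this] at h2
        exact Bool.noConfusion h2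
    · rw [if_neg hg]
      obtain ⟨hy, hys⟩ := List.pairwise_cons.mp h
      refine List.pairwise_cons.mpr ⟨?_, ih hys⟩
      intro z hz
      rcases (PySem.List.insertBy_mem_iff before x z ys).mp hz with hzx | hzs
      · subst hzx
        simpa using hg
      · exact hy z hzs

def pvLtb (a b : Int × Int) : Bool :=
  decide (a.1 < b.1) || (!decide (b.1 < a.1) && decide (a.2 < b.2))

lemma pvSorted2_eq_foldl (xs : List (Int × Int)) :
    PySem.List.sorted2 xs Prod.fst Prod.snd =
      xs.foldl (fun acc z => PySem.List.insertBy pvLtb z acc) [] := rfl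

lemma pvLtb_irr (a : Int × Int) : pvLtb a a = false := by simp [pvLtb]

lemma pvLtb_iff (a b : Int × Int) :
    pvLtb a b = true ↔ (a.1 < b.1 ∨ (¬ b.1 < a.1 ∧ a.2 < b.2)) := by
  simp [pvLtb]

lemma pvLtb_trans (a b c : Int × Int) (h1 : pvLtb a b = true) (h2 : pvLtb b c = true) :
    pvLtb a c = true := by
  rw [pvLtb_iff] at h1 h2 ⊢
  omega

lemma pvSorted2_pairwise (xs : List (Int × Int)) :
    (PySem.List.sorted2 xs Prod.fst Prod.snd).Pairwise (fun a b => pvLtb b a = false) := by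
  rw [pvSorted2_eq_foldl]
  have : ∀ (l : List (Int × Int)) (acc : List (Int × Int)),
      acc.Pairwise (fun a b => pvLtb b a = false) →
      (l.foldl (fun acc z => PySem.List.insertBy pvLtb z acc) acc).Pairwise
        (fun a b => pvLtb b a = false) := by
    intro l
    induction l with
    | nil => intro acc hacc; exact hacc
    | cons z l ih =>
      intro acc hacc
      exact ih _ (pvInsertBy_pairwise pvLtb pvLtb_irr pvLtb_trans z acc hacc)
  exact this xs [] (by simp)

lemma pvLtb_antisymm (a b : Int × Int) (h1 : pvLtb b a = false) (h2 : pvLtb a b = false) :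
    a = b := by
  have n1 : pvLtb b a ≠ true := by simp [h1]
  have n2 : pvLtb a b ≠ true := by simp [h2]
  rw [Ne, pvLtb_iff] at n1 n2
  exact Prod.ext (by omega) (by omega)

lemma pvSorted2_eq_of_perm (xs ys : List (Int × Int)) (h : xs.Perm ys) :
    PySem.List.sorted2 xs Prod.fst Prod.snd = PySem.List.sorted2 ys Prod.fst Prod.snd := by
  have hperm : (PySem.List.sorted2 xs Prod.fst Prod.snd).Perm
      (PySem.List.sorted2 ys Prod.fst Prod.snd) :=
    ((PySem.List.sorted2_perm xs Prod.fst Prod.snd false).trans h).trans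
      (PySem.List.sorted2_perm ys Prod.fst Prod.snd false).symm
  exact List.Perm.eq_of_pairwise (le := fun a b => pvLtb b a = false)
    (fun a b _ _ hab hba => pvLtb_antisymm a b hab hba)
    (pvSorted2_pairwise xs) (pvSorted2_pairwise ys) hperm

-- ---- final assembly ----

lemma pvSetCell_length (b : List (List Int)) (i j v : Int) :
    (pvSetCell b i j v).length = b.length := by
  rw [pvSetCell]
  rcases h : PySem.List.pyGet? b i with _ | row
  · rfl
  · simp [PySem.List.length_pySetD]

lemma pvSelfMarked (B : List (List Int)) (x y : Int)
    (h : pvInR B.length (x, y) → pvGetCell B x y = some (-1)) :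
    pvMarked B B [(x, y)] := by
  intro t ht
  by_cases htp : t = (x, y)
  · subst htp
    rw [if_pos (by simp)]
    exact h ht
  · rw [if_neg (by simp [htp])]

-- ===== VERDICT (by name: the statement is the Claim_ definition above) =====
theorem find_shape_spec : Claim_equal_find_shape := by
  intro board x y value hdom hpre
  obtain ⟨hsq, hxlo, hxhi, hylo, hyhi, hval⟩ := hpre
  unfold Spec_find_shape
  show find_shape board x y value = find_shape_alt board x y value
  simp only [find_shape, find_shape_alt]
  set b1 := pvSetCell board x y (-1) with hb1
  have hL : b1.length = board.length := pvSetCell_length board x y (-1)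
  have hstart : pvInR b1.length (x, y) → pvGetCell b1 x y = some (-1) := by
    intro hinr
    rw [hL] at hinr
    obtain ⟨w, hw⟩ := pvGetCell_square board (x, y) hsq hinr
    exact pvGetCell_set_same board x y (-1) w hinr.1 hinr.2.2.1 hw
  have hm0 : pvMarked b1 b1 [(x, y)] := pvSelfMarked b1 x y hstart
  rw [← hL]
  have gA := pvLoopA_spec b1 value x y hval (b1.length * b1.length + 1)
    b1 [(x, y)] [(x, y)] hm0
    (by simp)
    (by intro p hp hc; simp at hp; simp [hp] at hc)
    (by intro p hp; simp at hp; subst hp; exact pvReach.base)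
    (by simp)
    (by simp)
    (by intro p hp; simp at hp; subst hp; exact Or.inr rfl)
    (by simp only [List.length_cons, List.length_nil]; omega)
  have gB := pvScanLoop_spec b1 value x y hval (b1.length * b1.length + 2)
    b1 [(x, y)]
    ⟨hm0, by simp, by simp,
      by intro p hp; simp at hp; subst hp; exact pvReach.base,
      by intro p hp; simp at hp; subst hp; exact Or.inr rfl⟩
    (by simp only [List.length_cons, List.length_nil]; omega)
  have hperm : (pvLoopA (b1.length) value (b1.length * b1.length + 1)
      b1 [(x, y)] [(x, y)]).Perm
      (pvScanLoop (b1.length) value (b1.length * b1.length + 2) b1 [(x, y)]) := by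
    refine (List.perm_ext_iff_of_nodup gA.1 gB.1).mpr ?_
    intro a
    rw [pvGood_mem b1 value x y _ gA a, pvGood_mem b1 value x y _ gB a]
  rw [pvSorted2_eq_of_perm _ _ hperm]
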